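-- pv_equiv track=rewrite | github.com/rungjoo/simmc2.0 | sub2/test_dataset.py | utt2system
-- ===== SOURCE A (Python) =====
-- def utt2system(utt_obj, sys_obj_list):
--     utt_match_id = []
--     for utt_obj_id, utt_label in utt_obj.items():
--         if utt_label == 1:
--             utt_match_id.append(utt_obj_id)
--
--     """ system matching label (0,1) """
--     system2label = []
--     total_sys_match_id = []
--     for turn, sys_obj in enumerate(sys_obj_list):
--         sys_match_id = []
--         for sys_obj_id, sys_label in sys_obj.items():
--             if sys_label == 1:
--                 sys_match_id.append(sys_obj_id)
--                 total_sys_match_id.append(sys_obj_id)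
--
--         temp_match_id = []
--         match_num = 0
--         for sys_obj_id in sys_match_id:
--             if sys_obj_id in utt_match_id:
--                 match_num += 1
--                 temp_match_id.append(sys_obj_id)
--
--         if match_num == 0:
--             system2label.append(0)
--         else:
--             system2label.append(1)
--
--     """ object category label (0,1,2,3) """
--     objcat2label = []
--     match_num = 0
--     non_match_num = 0
--     for utt_obj_id in utt_match_id:
--         if utt_obj_id in total_sys_match_id:
--             match_num += 1
--         else:
--             non_match_num += 1
--
--     if match_num == 0:
--         if non_match_num == 0:
--             objcat2label = 0 # 매칭될 object 존재가 없는 발화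
--         else:
--             objcat2label = 1 # 이전의 system에서 언급된 object는 없고, 새로운 object가 있는 것
--     else:
--         if non_match_num == 0:
--             objcat2label = 1 # 2 이전의 system에서 언급된 object들이 후보일 경우
--         else:
--             objcat2label = 1 # 3 이전의 system에서 언급된 object들도 있고 새로운 object도 후보일 경우
--
--     return system2label, objcat2label
-- ===== SOURCE B (Python) =====
-- def utt2system(utt_obj, sys_obj_list):
--     utt_match_id = [obj_id for obj_id, label in utt_obj.items() if label == 1]
--     system2label = [
--         1 if any(label == 1 and obj_id in utt_match_id
--                  for obj_id, label in sys_obj.items()) else 0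
--         for sys_obj in sys_obj_list
--     ]
--     return system2label, (1 if utt_match_id else 0)
-- ===== Notes on version B (the rewrite author's own statement) =====
-- stated objective: simpler
-- what changed: Per-turn label is computed by a single short-circuiting any() over each system dict (no sys_match_id/temp_match_id lists, no second counting scan), and the whole total_sys_match_id accumulation plus the match_num/non_match_num counting pass is replaced by the closed form objcat2label = 1 if utt_match_id else 0, which A's branch structure always reduces to.
import Mathlib
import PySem

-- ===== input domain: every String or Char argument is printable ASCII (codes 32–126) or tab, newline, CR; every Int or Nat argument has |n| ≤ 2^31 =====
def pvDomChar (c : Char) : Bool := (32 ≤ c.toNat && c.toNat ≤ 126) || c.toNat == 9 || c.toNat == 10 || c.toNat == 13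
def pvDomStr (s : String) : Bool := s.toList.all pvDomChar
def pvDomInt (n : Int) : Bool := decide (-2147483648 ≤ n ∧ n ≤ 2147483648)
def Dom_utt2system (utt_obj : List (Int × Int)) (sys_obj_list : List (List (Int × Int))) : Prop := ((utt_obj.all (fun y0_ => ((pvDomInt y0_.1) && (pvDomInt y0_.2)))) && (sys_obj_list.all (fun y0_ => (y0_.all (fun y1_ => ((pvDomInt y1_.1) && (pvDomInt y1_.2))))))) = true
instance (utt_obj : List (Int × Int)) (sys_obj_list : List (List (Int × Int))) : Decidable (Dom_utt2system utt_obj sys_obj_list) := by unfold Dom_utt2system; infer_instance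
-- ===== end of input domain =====

-- B replaces A's total_sys_match_id accumulation and the match/non-match counting pass by the
-- closed form `1 if utt_match_id else 0`, and fuses each turn's two scans into one any(); objective: simpler.

-- ===== PORT A =====
-- A's loop bodies, as named step functions of the folds that port A's loops.
-- `if utt_label == 1: utt_match_id.append(utt_obj_id)`
def aStepFilt (acc : List Int) (p : Int × Int) : List Int :=
  if p.2 = 1 then acc ++ [p.1] else acc
-- `if sys_label == 1: sys_match_id.append(...); total_sys_match_id.append(...)`
def aStepPair (pr : List Int × List Int) (p : Int × Int) : List Int × List Int :=
  if p.2 = 1 then (pr.1 ++ [p.1], pr.2 ++ [p.1]) else pr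
-- `if sys_obj_id in utt_match_id: match_num += 1; temp_match_id.append(...)`
def aStepCount (u : List Int) (mn : Int × List Int) (id : Int) : Int × List Int :=
  if u.contains id then (mn.1 + 1, mn.2 ++ [id]) else mn
-- one iteration of `for turn, sys_obj in enumerate(sys_obj_list)`, state = (system2label, total_sys_match_id)
def aStepTurn (u : List Int) (st : List Int × List Int) (sys_obj : List (Int × Int)) :
    List Int × List Int :=
  let pr := sys_obj.foldl aStepPair ([], st.2)
  let mn := pr.1.foldl (aStepCount u) (0, [])
  (if mn.1 = 0 then st.1 ++ [0] else st.1 ++ [1], pr.2)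
-- `if utt_obj_id in total_sys_match_id: match_num += 1 else: non_match_num += 1`
def aStepCat (t : List Int) (c : Int × Int) (id : Int) : Int × Int :=
  if t.contains id then (c.1 + 1, c.2) else (c.1, c.2 + 1)

def utt2system (utt_obj : List (Int × Int)) (sys_obj_list : List (List (Int × Int))) : List Int × Int :=
  let utt_match_id : List Int := utt_obj.foldl aStepFilt []
  let st : List Int × List Int := sys_obj_list.foldl (aStepTurn utt_match_id) ([], [])
  let counts : Int × Int := utt_match_id.foldl (aStepCat st.2) (0, 0)
  let objcat2label : Int :=
    if counts.1 = 0 then (if counts.2 = 0 then 0 else 1)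
    else (if counts.2 = 0 then 1 else 1)
  (st.1, objcat2label)

-- ===== PORT B =====
-- `[obj_id for obj_id, label in utt_obj.items() if label == 1]`
def bFilt (l : List (Int × Int)) : List Int :=
  l.filterMap (fun p => if p.2 = 1 then some p.1 else none)
-- `1 if any(label == 1 and obj_id in utt_match_id for ...) else 0`
def bLabel (u : List Int) (sys_obj : List (Int × Int)) : Int :=
  if sys_obj.any (fun p => p.2 == 1 && u.contains p.1) then 1 else 0

def utt2system_alt (utt_obj : List (Int × Int)) (sys_obj_list : List (List (Int × Int))) : List Int × Int :=
  let utt_match_id : List Int := bFilt utt_obj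
  (sys_obj_list.map (bLabel utt_match_id), if utt_match_id.isEmpty then 0 else 1)

-- ===== PRECONDITION & SPEC =====
def Spec_utt2system (utt_obj : List (Int × Int)) (sys_obj_list : List (List (Int × Int))) (out : List Int × Int) : Prop := out = utt2system_alt utt_obj sys_obj_list
instance (utt_obj : List (Int × Int)) (sys_obj_list : List (List (Int × Int))) (out : List Int × Int) : Decidable (Spec_utt2system utt_obj sys_obj_list out) := by unfold Spec_utt2system; infer_instance

-- ===== CLAIM (what is proved, stated in full; the proofs are below) =====
def Claim_equal_utt2system : Prop := ∀ (utt_obj : List (Int × Int)) (sys_obj_list : List (List (Int × Int))), Dom_utt2system utt_obj sys_obj_list → Spec_utt2system utt_obj sys_obj_list (utt2system utt_obj sys_obj_list)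

-- ===== LEMMAS AND PROOFS =====

theorem pv_filt (l : List (Int × Int)) (acc : List Int) :
    l.foldl aStepFilt acc = acc ++ bFilt l := by
  induction l generalizing acc with
  | nil => simp [bFilt]
  | cons p t ih =>
      simp only [List.foldl_cons, aStepFilt, bFilt, List.filterMap_cons]
      by_cases h : p.2 = 1 <;> simp [h, ih, bFilt]

theorem pv_pair (l : List (Int × Int)) (a b : List Int) :
    l.foldl aStepPair (a, b) = (a ++ bFilt l, b ++ bFilt l) := by
  induction l generalizing a b with
  | nil => simp [bFilt]
  | cons p t ih =>
      simp only [List.foldl_cons, aStepPair, bFilt, List.filterMap_cons]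
      by_cases h : p.2 = 1 <;> simp [h, ih, bFilt]

theorem pv_count (u l : List Int) (c : Int) (t : List Int) :
    (l.foldl (aStepCount u) (c, t)).1 = c + (l.countP (fun id => u.contains id) : Int) := by
  induction l generalizing c t with
  | nil => simp
  | cons x xs ih =>
      simp only [List.foldl_cons, aStepCount, List.countP_cons]
      by_cases h : u.contains x <;> simp only [h, if_true, if_false] <;>
        rw [ih] <;> simp [h] <;> push_cast <;> ring

theorem pv_any_filt (u : List Int) (l : List (Int × Int)) :
    (bFilt l).any (fun id => u.contains id) = l.any (fun p => p.2 == 1 && u.contains p.1) := by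
  induction l with
  | nil => simp [bFilt]
  | cons p t ih =>
      by_cases h : p.2 = 1
      · rw [show bFilt (p :: t) = p.1 :: bFilt t from by simp [bFilt, List.filterMap_cons, h]]
        rw [List.any_cons, ih, List.any_cons]
        simp [h]
      · rw [show bFilt (p :: t) = bFilt t from by simp [bFilt, List.filterMap_cons, h]]
        rw [ih, List.any_cons]
        simp [h]

theorem pv_turn (u : List Int) (st : List Int × List Int) (s : List (Int × Int)) :
    aStepTurn u st s = (st.1 ++ [bLabel u s], st.2 ++ bFilt s) := by
  unfold aStepTurn
  simp only [pv_pair, List.nil_append, pv_count, Int.zero_add]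
  by_cases h : s.any (fun p => p.2 == 1 && u.contains p.1)
  · have : ¬ ((bFilt s).countP (fun id => u.contains id) : Int) = 0 := by
      simp only [Int.natCast_eq_zero, List.countP_eq_zero]
      intro hall
      rw [← pv_any_filt] at h
      rcases List.any_eq_true.mp h with ⟨x, hx, hpx⟩
      exact (hall x hx) hpx
    rw [if_neg this]
    unfold bLabel
    rw [if_pos h]
  · have : ((bFilt s).countP (fun id => u.contains id) : Int) = 0 := by
      simp only [Int.natCast_eq_zero, List.countP_eq_zero]
      intro x hx
      rw [← pv_any_filt] at h
      intro hpx
      exact h (List.any_eq_true.mpr ⟨x, hx, hpx⟩)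
    rw [if_pos this]
    unfold bLabel
    rw [if_neg h]

theorem pv_main (u : List Int) (sl : List (List (Int × Int))) (acc total : List Int) :
    (sl.foldl (aStepTurn u) (acc, total)).1 = acc ++ sl.map (bLabel u) := by
  induction sl generalizing acc total with
  | nil => simp
  | cons s t ih =>
      simp only [List.foldl_cons, List.map_cons]
      rw [pv_turn]
      rw [ih]
      simp

theorem pv_counts (t u : List Int) (a b : Int) :
    (u.foldl (aStepCat t) (a, b)).1 + (u.foldl (aStepCat t) (a, b)).2 = a + b + (u.length : Int)
    ∧ a ≤ (u.foldl (aStepCat t) (a, b)).1 ∧ b ≤ (u.foldl (aStepCat t) (a, b)).2 := by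
  induction u generalizing a b with
  | nil => simp
  | cons x xs ih =>
      simp only [List.foldl_cons, aStepCat, List.length_cons]
      by_cases h : t.contains x
      · rw [if_pos h]
        obtain ⟨h1, h2, h3⟩ := ih (a + 1) b
        refine ⟨by rw [h1]; push_cast; ring, by omega, by omega⟩
      · rw [if_neg h]
        obtain ⟨h1, h2, h3⟩ := ih a (b + 1)
        refine ⟨by rw [h1]; push_cast; ring, by omega, by omega⟩

theorem pv_cat (t u : List Int) :
    (if (u.foldl (aStepCat t) (0, 0)).1 = 0 then
       (if (u.foldl (aStepCat t) (0, 0)).2 = 0 then (0 : Int) else 1)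
     else (if (u.foldl (aStepCat t) (0, 0)).2 = 0 then 1 else 1))
    = if u.isEmpty then 0 else 1 := by
  obtain ⟨h1, h2, h3⟩ := pv_counts t u 0 0
  by_cases hn : u = []
  · simp [hn]
  · have hlen : 0 < (u.length : Int) := by
      have := List.length_pos_iff.mpr hn; exact_mod_cast this
    simp only [List.isEmpty_iff, hn, if_false]
    by_cases hx : (u.foldl (aStepCat t) (0, 0)).1 = 0
    · have hy : ¬ (u.foldl (aStepCat t) (0, 0)).2 = 0 := by omega
      simp [hx, hy]
    · simp [hx]

-- ===== VERDICT (by name: the statement is the Claim_ definition above) =====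
theorem utt2system_spec : Claim_equal_utt2system := by
  intro utt_obj sys_obj_list _
  show _ = _
  unfold utt2system utt2system_alt
  simp only []
  rw [pv_filt]
  simp only [List.nil_append]
  refine Prod.ext ?_ ?_
  · exact pv_main (bFilt utt_obj) sys_obj_list [] []
  · exact pv_cat _ (bFilt utt_obj)
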